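-- pv_equiv track=rewrite | github.com/DenisLo-master/Course2-geek-brains- | HW2/Task9.py | calculate
-- ===== SOURCE A (Python) =====
-- def calculate(value):
--     num_dict={}
--     sum_list=[]
--     try:
--         value=list(map(int, value.split(' ')))
--         for l in value:
--             sum_l = 0
--             for s in str(l):
--                 sum_l += int(s)
--             sum_list.append(sum_l)
--             num_dict[sum_l]=l
--         sum_list.sort()
--         max_sum=sum_list[-1]
--         return f'Число: {num_dict[max_sum]}, макс. сумма {max_sum}'
--     except ValueError:
--         return f'\nОШИБКА: Введите числа'
-- ===== SOURCE B (Python) =====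
-- def calculate(value):
--     try:
--         nums = list(map(int, value.split(' ')))
--         best = best_sum = None
--         for n in nums:
--             s = sum(int(c) for c in str(n))
--             if best_sum is None or s >= best_sum:
--                 best, best_sum = n, s
--         return f'Число: {best}, макс. сумма {best_sum}'
--     except ValueError:
--         return f'\nОШИБКА: Введите числа'
-- ===== Notes on version B (the rewrite author's own statement) =====
-- stated objective: simpler
-- what changed: Replaces the sum list, the sum-keyed dict and the sort with a single running-best pass (>= keeps the last number with the maximal digit sum, matching the dict-overwrite tie-break); the try/except ValueError behaviour is unchanged.
import Mathlib
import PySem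

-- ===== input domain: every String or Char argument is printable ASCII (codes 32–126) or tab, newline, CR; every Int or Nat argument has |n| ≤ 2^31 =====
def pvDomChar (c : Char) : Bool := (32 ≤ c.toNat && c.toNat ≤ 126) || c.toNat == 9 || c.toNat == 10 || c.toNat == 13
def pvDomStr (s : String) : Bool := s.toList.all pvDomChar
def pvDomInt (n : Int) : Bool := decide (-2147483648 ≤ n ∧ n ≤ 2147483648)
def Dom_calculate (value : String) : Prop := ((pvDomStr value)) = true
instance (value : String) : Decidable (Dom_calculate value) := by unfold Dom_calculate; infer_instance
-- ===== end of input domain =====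

-- B replaces A's sum list + sum-keyed dict + sort by a single running-best pass (objective: simpler).

-- ===== PORT A =====
-- sum_l = 0; for s in str(l): sum_l += int(s)   (int('-') raises ValueError on negatives → none)
def pvDigitSumA? (l : Int) : Option Int :=
  (PySem.Int.toChars l).foldlM (fun acc c => (PySem.Int.ofChars? [c]).map (fun d => acc + d)) 0

-- the for-loop building sum_list (by append) and num_dict (overwrite on equal sums)
def pvLoopA : List Int → List Int → PySem.Dict Int Int → Option (List Int × PySem.Dict Int Int)
  | [], sl, d => some (sl, d)
  | l :: rest, sl, d =>
    match pvDigitSumA? l with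
    | none => none
    | some s => pvLoopA rest (sl ++ [s]) (d.insert s l)

def calculate (value : String) : String :=
  -- value = list(map(int, value.split(' '))): splitOn is split(sep), ofChars? is int(); none = ValueError
  match (PySem.Chars.splitOn value.toList [' ']).mapM PySem.Int.ofChars? with
  | none => "\nОШИБКА: Введите числа"
  | some nums =>
    match pvLoopA nums [] PySem.Dict.empty with
    | none => "\nОШИБКА: Введите числа"
    | some (sl, d) =>
      -- sum_list.sort(); max_sum = sum_list[-1]
      match PySem.List.pyGet? (PySem.List.sorted sl (fun x => x) false) (-1) with
      | none => "\nОШИБКА: Введите числа"  -- unreachable: split(' ') yields ≥ 1 token, so sum_list ≠ []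
      | some m =>
        match d.get? m with
        | none => "\nОШИБКА: Введите числа"  -- unreachable: max_sum is a key of num_dict
        | some n => "Число: " ++ PySem.Int.toStr n ++ ", макс. сумма " ++ PySem.Int.toStr m

-- ===== PORT B =====
-- s = sum(int(c) for c in str(n))
def pvDigitSumB? (n : Int) : Option Int :=
  ((PySem.Int.toChars n).mapM (fun c => PySem.Int.ofChars? [c])).map List.sum

-- the running-best pass: if best_sum is None or s >= best_sum: best, best_sum = n, s
def pvLoopB : List Int → Option Int × Option Int → Option (Option Int × Option Int)
  | [], st => some st
  | n :: rest, (best, bestSum) =>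
    match pvDigitSumB? n with
    | none => none
    | some s =>
      match bestSum with
      | none => pvLoopB rest (some n, some s)
      | some bs => if bs ≤ s then pvLoopB rest (some n, some s) else pvLoopB rest (best, some bs)

-- f-string rendering of a possibly-None variable
def pvFmtOpt : Option Int → String
  | some n => PySem.Int.toStr n
  | none => "None"

def calculate_alt (value : String) : String :=
  match (PySem.Chars.splitOn value.toList [' ']).mapM PySem.Int.ofChars? with
  | none => "\nОШИБКА: Введите числа"
  | some nums =>
    match pvLoopB nums (none, none) with
    | none => "\nОШИБКА: Введите числа"
    | some (best, bestSum) =>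
      "Число: " ++ pvFmtOpt best ++ ", макс. сумма " ++ pvFmtOpt bestSum

-- ===== PRECONDITION & SPEC =====
def Spec_calculate (value : String) (out : String) : Prop := out = calculate_alt value
instance (value : String) (out : String) : Decidable (Spec_calculate value out) := by unfold Spec_calculate; infer_instance

-- ===== CLAIM (what is proved, stated in full; the proofs are below) =====
def Claim_equal_calculate : Prop := ∀ (value : String), Dom_calculate value → Spec_calculate value (calculate value)

-- ===== LEMMAS AND PROOFS =====

-- A's char-by-char accumulation equals B's sum over the parsed digit list
theorem pv_foldlM_map_eq_mapM_sum (f : Char → Option Int) :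
    ∀ (cs : List Char) (acc : Int),
      cs.foldlM (fun a c => (f c).map (fun d => a + d)) acc
        = (cs.mapM f).map (fun l => acc + l.sum) := by
  intro cs
  induction cs with
  | nil => intro acc; simp
  | cons c cs ih =>
    intro acc
    cases hf : f c with
    | none => simp [List.foldlM_cons, List.mapM_cons, hf]
    | some d =>
      simp [List.foldlM_cons, List.mapM_cons, hf, ih (acc + d)]
      cases hm : cs.mapM f with
      | none => simp
      | some l => simp [add_assoc]

theorem pv_digitSum_eq (l : Int) : pvDigitSumA? l = pvDigitSumB? l := by
  unfold pvDigitSumA? pvDigitSumB?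
  rw [pv_foldlM_map_eq_mapM_sum]
  cases hm : (PySem.Int.toChars l).mapM (fun c => PySem.Int.ofChars? [c]) <;> simp

theorem pvLoopA_append (xs : List Int) (n : Int) :
    ∀ (sl : List Int) (d : PySem.Dict Int Int),
      pvLoopA (xs ++ [n]) sl d
        = (pvLoopA xs sl d).bind (fun p =>
            match pvDigitSumA? n with
            | none => none
            | some s => some (p.1 ++ [s], p.2.insert s n)) := by
  induction xs with
  | nil =>
    intro sl d
    simp only [List.nil_append, pvLoopA]
    cases pvDigitSumA? n <;> simp
  | cons x xs ih =>
    intro sl d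
    simp only [List.cons_append, pvLoopA]
    cases pvDigitSumA? x <;> simp [ih]

theorem pvLoopB_append (xs : List Int) (n : Int) :
    ∀ (st : Option Int × Option Int),
      pvLoopB (xs ++ [n]) st
        = (pvLoopB xs st).bind (fun p =>
            match pvDigitSumB? n with
            | none => none
            | some s =>
              match p.2 with
              | none => some (some n, some s)
              | some bs => if bs ≤ s then some (some n, some s) else some (p.1, some bs)) := by
  induction xs with
  | nil =>
    intro st
    obtain ⟨best, bestSum⟩ := st
    simp only [List.nil_append, pvLoopB]
    cases pvDigitSumB? n with
    | none => simp
    | some s =>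
      cases bestSum with
      | none => simp
      | some bs =>
        by_cases h : bs ≤ s <;> simp [h]
  | cons x xs ih =>
    intro st
    obtain ⟨best, bestSum⟩ := st
    simp only [List.cons_append, pvLoopB]
    cases pvDigitSumB? x with
    | none => simp
    | some s =>
      cases bestSum with
      | none => simp [ih]
      | some bs => by_cases h : bs ≤ s <;> simp [h, ih]

-- joint invariant of the two loops
theorem pv_main (nums : List Int) :
    (pvLoopA nums [] PySem.Dict.empty = none ∧ pvLoopB nums (none, none) = none)
    ∨ (nums = [] ∧ pvLoopA nums [] PySem.Dict.empty = some ([], PySem.Dict.empty)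
        ∧ pvLoopB nums (none, none) = some (none, none))
    ∨ (∃ sl d b m, pvLoopA nums [] PySem.Dict.empty = some (sl, d)
        ∧ pvLoopB nums (none, none) = some (some b, some m)
        ∧ d.get? m = some b ∧ m ∈ sl ∧ (∀ y ∈ sl, y ≤ m)) := by
  induction nums using List.reverseRecOn with
  | nil => right; left; exact ⟨rfl, rfl, rfl⟩
  | append_singleton xs n ih =>
    have hds := pv_digitSum_eq n
    cases hA : pvDigitSumA? n with
    | none =>
      have hA' : pvDigitSumB? n = none := by rw [← hds]; exact hA
      left
      constructor
      · rw [pvLoopA_append]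
        cases pvLoopA xs [] PySem.Dict.empty <;> simp [hA]
      · rw [pvLoopB_append]
        cases pvLoopB xs (none, none) <;> simp [hA']
    | some s =>
      have hA' : pvDigitSumB? n = some s := by rw [← hds]; exact hA
      rcases ih with ⟨ha, hb⟩ | ⟨hxs, ha, hb⟩ | ⟨sl, d, b, m, ha, hb, hget, hmem, hub⟩
      · left
        constructor
        · rw [pvLoopA_append, ha]; rfl
        · rw [pvLoopB_append, hb]; rfl
      · right; right
        refine ⟨[s], PySem.Dict.empty.insert s n, n, s, ?_, ?_, ?_, ?_, ?_⟩
        · rw [pvLoopA_append, ha]; simp [hA]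
        · rw [pvLoopB_append, hb]; simp [hA']
        · exact PySem.Dict.get?_insert_self _ _ _
        · simp
        · intro y hy; simp at hy; omega
      · right; right
        by_cases hle : m ≤ s
        · refine ⟨sl ++ [s], d.insert s n, n, s, ?_, ?_, ?_, ?_, ?_⟩
          · rw [pvLoopA_append, ha]; simp [hA]
          · rw [pvLoopB_append, hb]; simp [hA', hle]
          · exact PySem.Dict.get?_insert_self _ _ _
          · simp
          · intro y hy
            rcases List.mem_append.1 hy with h | h
            · exact le_trans (hub y h) hle
            · simp at h; omega
        · refine ⟨sl ++ [s], d.insert s n, b, m, ?_, ?_, ?_, ?_, ?_⟩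
          · rw [pvLoopA_append, ha]; simp [hA]
          · rw [pvLoopB_append, hb]; simp [hA', hle]
          · rw [PySem.Dict.get?_insert_of_ne d n (by omega : m ≠ s)]; exact hget
          · exact List.mem_append.2 (Or.inl hmem)
          · intro y hy
            rcases List.mem_append.1 hy with h | h
            · exact hub y h
            · simp at h; omega

-- sorted(sum_list)[-1] is the (unique) maximum
theorem pv_sorted_last (sl : List Int) (m : Int) (hm : m ∈ sl) (hub : ∀ y ∈ sl, y ≤ m) :
    PySem.List.pyGet? (PySem.List.sorted sl (fun x => x) false) (-1) = some m := by
  rw [PySem.List.pyGet?_neg_one]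
  have hperm := PySem.List.sorted_perm sl (fun x => x) false
  have hmL : m ∈ PySem.List.sorted sl (fun x => x) false := hperm.mem_iff.2 hm
  have hne : PySem.List.sorted sl (fun x => x) false ≠ [] := List.ne_nil_of_mem hmL
  rw [List.getLast?_eq_some_getLast hne]
  congr 1
  have hlen : 0 < (PySem.List.sorted sl (fun x => x) false).length := List.length_pos_iff.2 hne
  have h1 : (PySem.List.sorted sl (fun x => x) false).getLast hne ≤ m :=
    hub _ (hperm.mem_iff.1 (List.getLast_mem hne))
  obtain ⟨i, hi, hEq⟩ := List.mem_iff_getElem.1 hmL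
  have h2 : m ≤ (PySem.List.sorted sl (fun x => x) false).getLast hne := by
    rw [List.getLast_eq_getElem]
    calc m = (PySem.List.sorted sl (fun x => x) false)[i]'hi := hEq.symm
      _ ≤ _ := PySem.List.sorted_id_getElem_mono sl (by omega) (by omega)
  exact le_antisymm h1 h2

theorem pv_splitOn_go_ne_nil (sep : List Char) :
    ∀ (fuel : Nat) (l cur : List Char) (acc : List (List Char)),
      PySem.Chars.splitOn.go sep fuel l cur acc ≠ [] := by
  intro fuel
  induction fuel with
  | zero => intro l cur acc; simp [PySem.Chars.splitOn.go]
  | succ fuel ih =>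
    intro l cur acc
    cases l with
    | nil => simp [PySem.Chars.splitOn.go]
    | cons c rest =>
      rw [PySem.Chars.splitOn.go]
      by_cases h : sep.isPrefixOf (c :: rest) = true
      · simp only [h, if_true]; exact ih _ _ _
      · simp only [h, if_false, Bool.false_eq_true]; exact ih _ _ _

theorem pv_mapM_some_nil {α β : Type} (f : α → Option β) (xs : List α)
    (h : xs.mapM f = some []) : xs = [] := by
  cases xs with
  | nil => rfl
  | cons x xs =>
    exfalso
    rw [List.mapM_cons] at h
    cases hf : f x <;> rw [hf] at h <;> simp at h
    cases hm : xs.mapM f <;> rw [hm] at h <;> simp at h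

-- ===== VERDICT (by name: the statement is the Claim_ definition above) =====
theorem calculate_spec : Claim_equal_calculate := by
  unfold Claim_equal_calculate
  intro value _hdom
  unfold Spec_calculate
  cases hp : (PySem.Chars.splitOn value.toList [' ']).mapM PySem.Int.ofChars? with
  | none => simp [calculate, calculate_alt, hp]
  | some nums =>
    have hnn : nums ≠ [] := by
      intro h
      subst h
      have hnil := pv_mapM_some_nil _ _ hp
      exact pv_splitOn_go_ne_nil [' '] (value.toList.length + 1) value.toList [] []
        (by simpa [PySem.Chars.splitOn] using hnil)
    rcases pv_main nums with ⟨ha, hb⟩ | ⟨hnil, _, _⟩ | ⟨sl, d, b, m, ha, hb, hget, hmem, hub⟩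
    · simp [calculate, calculate_alt, hp, ha, hb]
    · exact absurd hnil hnn
    · have hlast := pv_sorted_last sl m hmem hub
      simp [calculate, calculate_alt, hp, ha, hb, hlast, hget, pvFmtOpt]
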